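-- pv_equiv track=rewrite | github.com/ldunbar3/codewars | kyu5/All_Star_Code_Challenge_19.py | slogan_maker
-- ===== SOURCE A (Python) =====
-- from itertools import permutations
--
-- def slogan_maker(array):
--     tmp = []
--     result = []
--     for i in array:
--         if i not in tmp:
--             tmp.append(i)
--     tmp = list(permutations(tmp))
--     for i in tmp:
--         result.append(' '.join(i))
--     return result
-- ===== SOURCE B (Python) =====
-- def slogan_maker(array):
--     uniq = list(dict.fromkeys(array))
--
--     def gen(remaining, prefix):
--         if not remaining:
--             return [' '.join(prefix)]
--         out = []
--         for i in range(len(remaining)):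
--             out.extend(gen(remaining[:i] + remaining[i + 1:], prefix + [remaining[i]]))
--         return out
--
--     return gen(uniq, [])
-- ===== Notes on version B (the rewrite author's own statement) =====
-- stated objective: alternative
-- what changed: Replaces the quadratic membership-list dedup with dict.fromkeys and replaces itertools.permutations + a join loop with a hand-written recursive generator that picks each remaining element in index order, builds the prefix, and emits the joined slogan at the base case.
import Mathlib
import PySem

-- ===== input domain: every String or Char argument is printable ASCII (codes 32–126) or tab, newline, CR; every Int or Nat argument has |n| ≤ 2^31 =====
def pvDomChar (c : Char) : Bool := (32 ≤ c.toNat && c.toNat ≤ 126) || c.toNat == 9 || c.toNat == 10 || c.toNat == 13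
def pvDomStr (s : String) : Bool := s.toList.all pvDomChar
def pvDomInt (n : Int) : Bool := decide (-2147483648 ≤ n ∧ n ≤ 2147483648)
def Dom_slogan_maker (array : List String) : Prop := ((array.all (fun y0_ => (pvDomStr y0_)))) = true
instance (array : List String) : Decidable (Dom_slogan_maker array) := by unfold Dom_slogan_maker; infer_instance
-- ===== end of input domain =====

-- B replaces the membership-list dedup by dict.fromkeys and itertools.permutations by a
-- recursive choose-an-index generator that joins the prefix at the base case (alternative decomposition).

-- ===== PORT A =====
def slogan_maker (array : List String) : List String :=
  let tmp := array.foldl (fun tmp i => if tmp.contains i then tmp else tmp ++ [i]) []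
  let perms := PySem.List.permutations tmp tmp.length
  perms.foldl (fun result i => result ++ [PySem.Str.join " " i]) []

-- ===== PORT B =====
-- Source B's gen recurses until 'remaining' is empty; the fuel (= remaining's length at the top call)
-- only makes the recursion structural and hits 0 exactly when remaining is empty.
def sloganGen : Nat → List String → List String → List String
  | 0, _, pre => [PySem.Str.join " " pre]
  | Nat.succ n, rem, pre =>
      (List.range rem.length).flatMap fun i =>
        match rem[i]? with
        | none => []
        | some x => sloganGen n (rem.eraseIdx i) (pre ++ [x])

def slogan_maker_alt (array : List String) : List String :=
  let uniq := PySem.List.dedup array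
  sloganGen uniq.length uniq []

-- ===== PRECONDITION & SPEC =====
def Spec_slogan_maker (array : List String) (out : List String) : Prop := out = slogan_maker_alt array
instance (array : List String) (out : List String) : Decidable (Spec_slogan_maker array out) := by unfold Spec_slogan_maker; infer_instance

-- ===== CLAIM (what is proved, stated in full; the proofs are below) =====
def Claim_equal_slogan_maker : Prop := ∀ (array : List String), Dom_slogan_maker array → Spec_slogan_maker array (slogan_maker array)

-- ===== LEMMAS AND PROOFS =====

-- B's generator emits exactly ' '.join(pre ++ p) for each p produced by itertools.permutations.
theorem sloganGen_eq_permutations (n : Nat) : ∀ (rem pre : List String),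
    sloganGen n rem pre
      = (PySem.List.permutations rem n).map (fun p => PySem.Str.join " " (pre ++ p)) := by
  induction n with
  | zero =>
      intro rem pre
      simp [sloganGen, PySem.List.permutations]
  | succ n ih =>
      intro rem pre
      simp only [sloganGen, PySem.List.permutations, List.map_flatMap]
      refine List.flatMap_congr ?_
      intro i _
      cases h : rem[i]? with
      | none => simp
      | some x =>
          simp only [ih, List.map_map]
          refine List.map_congr_left fun p _ => ?_
          simp

theorem slogan_maker_spec : Claim_equal_slogan_maker := by
  intro array _
  unfold Spec_slogan_maker slogan_maker slogan_maker_alt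
  rw [sloganGen_eq_permutations, PySem.List.foldl_append_singleton_eq_map]
  rfl
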